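-- pv_equiv track=rewrite | github.com/neurosnap/yaplint | packages/blank_lines/yaplint_blank_lines.py | remove_newlines
-- ===== SOURCE A (Python) =====
-- def remove_newlines(prefix_arr, newline_setting):
--     counter = 0
--     fixed = False
--     new_prefix_arr = []
--
--     for _str in reversed(prefix_arr):
--         if not fixed and counter == newline_setting:
--             fixed = True
--
--         if _str == '':
--             if counter == newline_setting:
--                 continue
--             counter = counter + 1
--         elif _str != '':
--             counter = 0
--
--         new_prefix_arr.append(_str)
--     return new_prefix_arr
-- ===== SOURCE B (Python) =====
-- def remove_newlines(prefix_arr, newline_setting):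
--     # run-length grouping over the reversed list: blank runs are truncated
--     # to their first newline_setting elements (kept whole if negative)
--     rev = prefix_arr[::-1]
--     out = []
--     i = 0
--     n = len(rev)
--     while i < n:
--         blank = (rev[i] == '')
--         j = i
--         while j < n and (rev[j] == '') == blank:
--             j += 1
--         run = rev[i:j]
--         if blank and newline_setting >= 0:
--             run = run[:newline_setting]
--         out.extend(run)
--         i = j
--     return out
-- ===== Notes on version B (the rewrite author's own statement) =====
-- stated objective: alternative
-- what changed: Replaces the stateful per-element blank counter (with the dead 'fixed' flag) by a run-length grouping pass over the reversed list that truncates each maximal blank run to its first newline_setting elements.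
import Mathlib
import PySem

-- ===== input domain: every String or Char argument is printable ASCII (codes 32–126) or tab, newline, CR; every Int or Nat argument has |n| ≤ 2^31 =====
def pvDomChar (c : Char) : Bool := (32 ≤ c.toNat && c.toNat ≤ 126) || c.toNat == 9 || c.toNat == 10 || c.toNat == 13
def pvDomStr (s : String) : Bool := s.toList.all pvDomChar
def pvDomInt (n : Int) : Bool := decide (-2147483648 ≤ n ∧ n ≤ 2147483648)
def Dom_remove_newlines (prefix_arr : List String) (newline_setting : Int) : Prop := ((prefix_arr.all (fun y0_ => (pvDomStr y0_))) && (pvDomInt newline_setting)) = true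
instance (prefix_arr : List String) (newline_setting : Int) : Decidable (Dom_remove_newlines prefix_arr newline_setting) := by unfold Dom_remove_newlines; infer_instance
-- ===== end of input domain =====

-- B replaces A's per-element blank counter by a run-length grouping pass over the reversed list (alternative decomposition, same cost).

-- ===== PORT A =====
-- loop body of A; state = (counter, fixed, new_prefix_arr); 'fixed' is set but never read, kept for fidelity
def rnStep (ns : Int) (st : Int × Bool × List String) (_str : String) : Int × Bool × List String :=
  let counter := st.1
  let fixed := st.2.1
  let fixed := if ¬ fixed ∧ counter = ns then true else fixed
  if _str = "" then
    if counter = ns then (counter, fixed, st.2.2)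
    else (counter + 1, fixed, st.2.2 ++ [_str])
  else (0, fixed, st.2.2 ++ [_str])

def remove_newlines (prefix_arr : List String) (newline_setting : Int) : List String :=
  (prefix_arr.reverse.foldl (rnStep newline_setting) (0, false, [])).2.2

-- ===== PORT B =====
-- B: walk the reversed list as maximal runs keyed on blankness; a blank run is truncated
-- to its first newline_setting elements when newline_setting ≥ 0, kept whole otherwise.
def rnAltGo (ns : Int) : List String → List String
  | [] => []
  | s :: rest =>
    (if (s == "") && decide (0 ≤ ns)
       then (s :: rest.takeWhile (fun t => (t == "") == (s == ""))).take ns.toNat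
       else s :: rest.takeWhile (fun t => (t == "") == (s == ""))) ++
    rnAltGo ns (rest.dropWhile (fun t => (t == "") == (s == "")))
termination_by l => l.length
decreasing_by
  simp only [List.length_cons]
  exact Nat.lt_succ_of_le (List.length_dropWhile_le _ _)

def remove_newlines_alt (prefix_arr : List String) (newline_setting : Int) : List String :=
  rnAltGo newline_setting prefix_arr.reverse

-- ===== PRECONDITION & SPEC =====
def Spec_remove_newlines (prefix_arr : List String) (newline_setting : Int) (out : List String) : Prop := out = remove_newlines_alt prefix_arr newline_setting
instance (prefix_arr : List String) (newline_setting : Int) (out : List String) : Decidable (Spec_remove_newlines prefix_arr newline_setting out) := by unfold Spec_remove_newlines; infer_instance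

-- ===== CLAIM (what is proved, stated in full; the proofs are below) =====
def Claim_equal_remove_newlines : Prop := ∀ (prefix_arr : List String) (newline_setting : Int), Dom_remove_newlines prefix_arr newline_setting → Spec_remove_newlines prefix_arr newline_setting (remove_newlines prefix_arr newline_setting)

-- ===== LEMMAS AND PROOFS =====

-- functional view of A's loop (counter only; 'fixed' is never read)
def rnAGo (ns : Int) : List String → Int → List String
  | [], _ => []
  | s :: rest, c =>
    if s = "" then
      if c = ns then rnAGo ns rest c else s :: rnAGo ns rest (c + 1)
    else s :: rnAGo ns rest 0

lemma rnAGo_cons (ns : Int) (s : String) (rest : List String) (c : Int) :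
    rnAGo ns (s :: rest) c =
      if s = "" then
        if c = ns then rnAGo ns rest c else s :: rnAGo ns rest (c + 1)
      else s :: rnAGo ns rest 0 := rfl

lemma rnFold_eq (ns : Int) (l : List String) : ∀ (c : Int) (fx : Bool) (acc : List String),
    (l.foldl (rnStep ns) (c, fx, acc)).2.2 = acc ++ rnAGo ns l c := by
  induction l with
  | nil => intro c fx acc; simp [rnAGo]
  | cons s rest ih =>
    intro c fx acc
    rw [List.foldl_cons, rnAGo_cons]
    by_cases hs : s = "" <;> by_cases hc : c = ns <;>
      simp only [rnStep, hs, hc, if_pos, if_neg, not_false_iff] <;>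
      simp [ih]

lemma rnAGo_nonblank_head (ns : Int) (l : List String)
    (h : ∀ t, l.head? = some t → t ≠ "") (c : Int) :
    rnAGo ns l c = rnAGo ns l 0 := by
  cases l with
  | nil => rfl
  | cons t r =>
    have ht : t ≠ "" := h t rfl
    simp [rnAGo_cons, ht]

lemma rnAGo_neg (ns : Int) (hns' : ns < 0) (l : List String) :
    ∀ c : Int, 0 ≤ c → rnAGo ns l c = l := by
  induction l with
  | nil => intro c _; rfl
  | cons s rest ih =>
    intro c hc
    have hcn : c ≠ ns := by omega
    clear hns'
    by_cases hs : s = "" <;>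
      simp [rnAGo_cons, hs, hcn, ih (c + 1) (by omega), ih 0 le_rfl]

lemma rnAGo_blanks (ns : Int) (_hns : 0 ≤ ns) (bs : List String) :
    ∀ (rest : List String) (c : Int), (∀ b ∈ bs, b = "") → 0 ≤ c → c ≤ ns →
      (∀ t, rest.head? = some t → t ≠ "") →
      rnAGo ns (bs ++ rest) c = bs.take (ns - c).toNat ++ rnAGo ns rest 0 := by
  induction bs with
  | nil => intro rest c _ _ _ hrest; simpa using rnAGo_nonblank_head ns rest hrest c
  | cons b bs ih =>
    intro rest c hb hc0 hcn hrest
    have hb1 : b = "" := hb b (by simp)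
    have hbs : ∀ x ∈ bs, x = "" := fun x hx => hb x (by simp [hx])
    rw [List.cons_append, rnAGo_cons, if_pos hb1]
    by_cases hceq : c = ns
    · have h0 : (ns - c).toNat = 0 := by omega
      rw [if_pos hceq, ih rest c hbs hc0 hcn hrest, h0]
      simp
    · have hlt : c < ns := lt_of_le_of_ne hcn hceq
      have h1 : (ns - c).toNat = (ns - (c + 1)).toNat + 1 := by omega
      rw [if_neg hceq, ih rest (c + 1) hbs (by omega) (by omega) hrest, h1]
      simp [hb1]

lemma rnAGo_nonblanks (ns : Int) (ts : List String) :
    ∀ (rest : List String) (c : Int), (∀ t ∈ ts, t ≠ "") →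
      rnAGo ns (ts ++ rest) c = ts ++ rnAGo ns rest (if ts.isEmpty then c else 0) := by
  induction ts with
  | nil => intro rest c _; simp
  | cons t ts ih =>
    intro rest c ht
    have ht1 : t ≠ "" := ht t (by simp)
    have hts : ∀ x ∈ ts, x ≠ "" := fun x hx => ht x (by simp [hx])
    rw [List.cons_append, rnAGo_cons, if_neg ht1, ih rest 0 hts]
    cases ts <;> simp

lemma rn_dropWhile_head {p : String → Bool} (l : List String) :
    ∀ t, (l.dropWhile p).head? = some t → p t = false := by
  induction l with
  | nil => intro t h; simp at h
  | cons s rest ih =>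
    intro t h
    rw [List.dropWhile_cons] at h
    by_cases hp : p s = true
    · exact ih t (by simpa [hp] using h)
    · rw [if_neg hp, List.head?_cons] at h
      obtain rfl : s = t := by simpa using h
      exact Bool.eq_false_iff.mpr hp

lemma rn_main (ns : Int) (l : List String) : rnAGo ns l 0 = rnAltGo ns l := by
  fun_induction rnAltGo ns l with
  | case1 => rfl
  | case2 s rest ih =>
    have hdecomp : s :: rest =
        (s :: rest.takeWhile (fun t => (t == "") == (s == ""))) ++
          rest.dropWhile (fun t => (t == "") == (s == "")) := by
      simp
    by_cases hs : s = ""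
    · have hblank : (s == "") = true := by simp [hs]
      by_cases hns : 0 ≤ ns
      · have hbl : ∀ b ∈ s :: rest.takeWhile (fun t => (t == "") == (s == "")), b = "" := by
          intro b hb
          rcases List.mem_cons.mp hb with h | h
          · exact h ▸ hs
          · have := List.mem_takeWhile_imp h
            simpa [hblank] using this
        have hrest' : ∀ t, (rest.dropWhile (fun t => (t == "") == (s == ""))).head? = some t → t ≠ "" := by
          intro t h
          have := rn_dropWhile_head rest t h
          simpa [hblank] using this
        rw [hdecomp, rnAGo_blanks ns hns _ _ 0 hbl le_rfl hns hrest', ih]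
        have : ((ns : Int) - 0).toNat = ns.toNat := by omega
        rw [this, if_pos (by simp [hblank, hns])]
      · rw [if_neg (by simp [hns]), ← ih,
          rnAGo_neg ns (by omega) _ 0 le_rfl,
          rnAGo_neg ns (by omega) _ 0 le_rfl, ← hdecomp]
    · have hblank : (s == "") = false := by simp [hs]
      have htl : ∀ t ∈ s :: rest.takeWhile (fun t => (t == "") == (s == "")), t ≠ "" := by
        intro t ht
        rcases List.mem_cons.mp ht with h | h
        · exact h ▸ hs
        · have := List.mem_takeWhile_imp h
          simp [hblank] at this
          simpa using this
      rw [hdecomp, rnAGo_nonblanks ns _ _ 0 htl]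
      simp only [ite_self]
      rw [ih, if_neg (by simp [hblank])]

-- ===== VERDICT (by name: the statement is the Claim_ definition above) =====
theorem remove_newlines_spec : Claim_equal_remove_newlines := by
  intro prefix_arr newline_setting _
  unfold Spec_remove_newlines remove_newlines remove_newlines_alt
  rw [rnFold_eq, rn_main]
  simp
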